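-- pv_equiv track=rewrite | github.com/LLprod39/WebTerm | app/agent_kernel/memory/repair.py | detect_fact_conflicts
-- ===== SOURCE A (Python) =====
-- def detect_fact_conflicts(existing_records: list[dict], new_facts: list[dict]) -> list[dict]:
--     conflicts: list[dict] = []
--     for fact in new_facts:
--         title = (fact.get("title") or "").strip().lower()
--         category = (fact.get("category") or "").strip().lower()
--         content = (fact.get("content") or "").strip()
--         if not title or not content:
--             continue
--         for current in existing_records:
--             current_title = (current.get("title") or "").strip().lower()
--             current_category = (current.get("category") or "").strip().lower()
--             current_content = (current.get("content") or "").strip()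
--             if title == current_title and category == current_category and current_content and current_content != content:
--                 conflicts.append(
--                     {
--                         "title": fact.get("title"),
--                         "category": fact.get("category"),
--                         "old_content": current_content,
--                         "new_content": content,
--                     }
--                 )
--     return conflicts
-- ===== SOURCE B (Python) =====
-- def detect_fact_conflicts(existing_records: list[dict], new_facts: list[dict]) -> list[dict]:
--     # Index existing records once by normalized (title, category); each new fact then does a single lookup instead of scanning all records.
--     index: dict = {}
--     for current in existing_records:
--         key = (
--             (current.get("title") or "").strip().lower(),
--             (current.get("category") or "").strip().lower(),
--         )
--         current_content = (current.get("content") or "").strip()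
--         if current_content:
--             index.setdefault(key, []).append(current_content)
--     conflicts: list[dict] = []
--     for fact in new_facts:
--         title = (fact.get("title") or "").strip().lower()
--         category = (fact.get("category") or "").strip().lower()
--         content = (fact.get("content") or "").strip()
--         if not title or not content:
--             continue
--         for old_content in index.get((title, category), []):
--             if old_content != content:
--                 conflicts.append(
--                     {
--                         "title": fact.get("title"),
--                         "category": fact.get("category"),
--                         "old_content": old_content,
--                         "new_content": content,
--                     }
--                 )
--     return conflicts
-- ===== Notes on version B (the rewrite author's own statement) =====
-- stated objective: alternative
-- what changed: B replaces the nested scan of existing_records per new fact by a dict index built once, keyed by normalized (title, category) and holding the non-empty stripped contents in order, so each new fact does one lookup instead of a full scan; O(N*M) worst case becomes O(N+M+conflicts).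
import Mathlib
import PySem

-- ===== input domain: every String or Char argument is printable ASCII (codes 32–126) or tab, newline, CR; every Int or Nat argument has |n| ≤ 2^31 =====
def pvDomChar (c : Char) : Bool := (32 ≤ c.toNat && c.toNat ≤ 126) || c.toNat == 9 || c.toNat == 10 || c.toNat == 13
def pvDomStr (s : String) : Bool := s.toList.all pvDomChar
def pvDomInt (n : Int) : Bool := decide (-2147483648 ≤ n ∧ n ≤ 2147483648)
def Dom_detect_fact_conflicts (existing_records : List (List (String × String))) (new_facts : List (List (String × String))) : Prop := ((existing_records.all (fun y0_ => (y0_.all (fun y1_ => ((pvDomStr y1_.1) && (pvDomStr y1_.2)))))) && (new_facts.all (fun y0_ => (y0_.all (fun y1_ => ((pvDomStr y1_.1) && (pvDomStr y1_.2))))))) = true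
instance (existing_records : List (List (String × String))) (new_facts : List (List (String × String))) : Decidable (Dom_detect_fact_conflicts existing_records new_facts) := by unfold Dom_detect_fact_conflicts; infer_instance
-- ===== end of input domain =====

-- ===== PORT A =====
-- B builds a (title,category) index of existing_records once instead of rescanning them per new fact (alternative algorithm, same return value).
-- Shared accessors: Python's `(d.get(k) or "")` (first-match lookup; None and "" both become "").
def pvGetS (r : List (String × String)) (k : String) : String :=
  match r.find? (fun p => p.1 == k) with
  | some p => p.2
  | none => ""

def pvNorm (s : String) : String := PySem.Str.lower (PySem.Str.strip s)

def detect_fact_conflicts (existing_records : List (List (String × String))) (new_facts : List (List (String × String))) : List (List (String × String)) :=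
  new_facts.foldl (fun conflicts fact =>
    let title := pvNorm (pvGetS fact "title")
    let category := pvNorm (pvGetS fact "category")
    let content := PySem.Str.strip (pvGetS fact "content")
    if title == "" || content == "" then conflicts
    else
      existing_records.foldl (fun cs current =>
        let current_title := pvNorm (pvGetS current "title")
        let current_category := pvNorm (pvGetS current "category")
        let current_content := PySem.Str.strip (pvGetS current "content")
        if title == current_title && category == current_category && current_content != "" && current_content != content then
          cs ++ [[("title", pvGetS fact "title"), ("category", pvGetS fact "category"),
                  ("old_content", current_content), ("new_content", content)]]
        else cs) conflicts) []

-- ===== PORT B =====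
def pvIndex (existing_records : List (List (String × String))) : PySem.Dict (String × String) (List String) :=
  existing_records.foldl (fun d current =>
    if PySem.Str.strip (pvGetS current "content") == "" then d
    else d.modify (pvNorm (pvGetS current "title"), pvNorm (pvGetS current "category")) []
      (fun x => x ++ [PySem.Str.strip (pvGetS current "content")])) PySem.Dict.empty

def detect_fact_conflicts_alt (existing_records : List (List (String × String))) (new_facts : List (List (String × String))) : List (List (String × String)) :=
  let index := pvIndex existing_records
  new_facts.foldl (fun conflicts fact =>
    let title := pvNorm (pvGetS fact "title")
    let category := pvNorm (pvGetS fact "category")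
    let content := PySem.Str.strip (pvGetS fact "content")
    if title == "" || content == "" then conflicts
    else
      (index.getD (title, category) []).foldl (fun cs old_content =>
        if old_content != content then
          cs ++ [[("title", pvGetS fact "title"), ("category", pvGetS fact "category"),
                  ("old_content", old_content), ("new_content", content)]]
        else cs) conflicts) []

-- ===== PRECONDITION & SPEC =====
-- Pre_ excludes exactly the new facts that would emit a conflict while lacking a "category" key:
-- there Python A returns a dict whose "category" value is None, not a str (outside the declared value type).
def Pre_detect_fact_conflicts (existing_records : List (List (String × String))) (new_facts : List (List (String × String))) : Prop :=
  ∀ fact ∈ new_facts, "category" ∈ fact.map Prod.fst ∨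
    pvNorm (pvGetS fact "title") = "" ∨ PySem.Str.strip (pvGetS fact "content") = "" ∨
    ¬ ∃ current ∈ existing_records,
        pvNorm (pvGetS current "title") = pvNorm (pvGetS fact "title") ∧
        pvNorm (pvGetS current "category") = pvNorm (pvGetS fact "category") ∧
        PySem.Str.strip (pvGetS current "content") ≠ "" ∧
        PySem.Str.strip (pvGetS current "content") ≠ PySem.Str.strip (pvGetS fact "content")
instance (existing_records : List (List (String × String))) (new_facts : List (List (String × String))) : Decidable (Pre_detect_fact_conflicts existing_records new_facts) := by unfold Pre_detect_fact_conflicts; infer_instance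

def pvWitness_detect_fact_conflicts : (List (List (String × String))) × (List (List (String × String))) :=
  ([[("title", " A "), ("category", "c"), ("content", "x")]],
   [[("title", "a"), ("category", " C"), ("content", "y")]])

def Spec_detect_fact_conflicts (existing_records : List (List (String × String))) (new_facts : List (List (String × String))) (out : List (List (String × String))) : Prop := out = detect_fact_conflicts_alt existing_records new_facts
instance (existing_records : List (List (String × String))) (new_facts : List (List (String × String))) (out : List (List (String × String))) : Decidable (Spec_detect_fact_conflicts existing_records new_facts out) := by unfold Spec_detect_fact_conflicts; infer_instance

-- ===== CLAIM (what is proved, stated in full; the proofs are below) =====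
def Claim_equal_detect_fact_conflicts : Prop := ∀ (existing_records : List (List (String × String))) (new_facts : List (List (String × String))), Dom_detect_fact_conflicts existing_records new_facts → Pre_detect_fact_conflicts existing_records new_facts → Spec_detect_fact_conflicts existing_records new_facts (detect_fact_conflicts existing_records new_facts)

-- ===== LEMMAS AND PROOFS =====
-- B's index loop is a fold of `modify … (· ++ [·])` over the extracted (key, content) pairs
theorem pv_gen_index {α : Type} (l : List α) (key : α → String × String) (sc : α → String)
    (d : PySem.Dict (String × String) (List String)) :
    l.foldl (fun d cur => if sc cur == "" then d else d.modify (key cur) [] (fun x => x ++ [sc cur])) d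
      = (l.filterMap (fun cur => if sc cur == "" then none else some (key cur, sc cur))).foldl
          (fun d p => d.modify p.1 [] (fun x => x ++ [p.2])) d := by
  induction l generalizing d with
  | nil => rfl
  | cons cur rest ih =>
    simp only [List.foldl_cons, List.filterMap_cons]
    by_cases h : (sc cur == "") = true
    · simp only [h]
      exact ih d
    · simp only [h, Bool.false_eq_true]
      exact ih _

-- what a lookup in B's index, filtered by ≠ content, yields: exactly A's matching contents in order
theorem pv_filterMap_ite {α β : Type} (l : List α) (p : α → Bool) (f : α → β) :
    l.filterMap (fun x => if p x then some (f x) else none) = (l.filter p).map f := by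
  induction l with
  | nil => rfl
  | cons a as ih => by_cases h : p a <;> simp [h, ih]

theorem pv_gen_lookup {α : Type} (l : List α) (nt nc sc : α → String) (t c content : String) :
    List.filter (fun old => old != content)
        (List.map (fun x => x.2)
          (List.filter (fun p => p.1 == (t, c))
            (l.filterMap (fun cur => if sc cur == "" then none else some ((nt cur, nc cur), sc cur)))))
      = (l.filter (fun cur => t == nt cur && c == nc cur && sc cur != "" && sc cur != content)).map sc := by
  rw [List.filter_filterMap, List.map_filterMap, List.filter_filterMap, ← pv_filterMap_ite]
  apply List.filterMap_congr
  intro cur _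
  by_cases h0 : sc cur = ""
  · simp [h0]
  · by_cases h1 : t = nt cur
    · by_cases h2 : c = nc cur
      · by_cases h3 : sc cur = content
        · have hc : ¬ content = "" := by rw [← h3]; exact h0
          simp [Option.filter, h1, h2, h3, hc]
        · simp [Option.filter, h0, h1, h2, h3]
      · simp [Option.filter, h0, h2, Ne.symm h2]
    · simp [Option.filter, h0, h1, Ne.symm h1]

-- A's inner scan over existing_records = B's single index lookup plus the ≠-content scan
set_option maxHeartbeats 1000000 in
theorem pv_gen_inner {α β : Type} (l : List α) (nt nc sc : α → String) (t c content : String)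
    (mk : String → β) (acc : List β) :
    l.foldl (fun cs cur =>
        if t == nt cur && c == nc cur && sc cur != "" && sc cur != content then cs ++ [mk (sc cur)]
        else cs) acc
      = (((l.foldl (fun d cur => if sc cur == "" then d
              else d.modify (nt cur, nc cur) [] (fun x => x ++ [sc cur])) PySem.Dict.empty).getD (t, c) []).foldl
          (fun cs old => if old != content then cs ++ [mk old] else cs) acc) := by
  rw [PySem.List.foldl_append_if
        (fun cur => t == nt cur && c == nc cur && sc cur != "" && sc cur != content)
        (fun cur => mk (sc cur)),
      PySem.List.foldl_append_if (fun old => old != content) mk,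
      pv_gen_index l (fun cur => (nt cur, nc cur)) sc,
      PySem.Dict.getD_foldl_modify_append, PySem.Dict.getD_empty, List.nil_append,
      pv_gen_lookup l nt nc sc t c content, List.map_map]
  rfl

-- one new fact processed: A's scan step = B's lookup step
theorem pv_step (existing_records : List (List (String × String))) (fact : List (String × String))
    (acc : List (List (String × String))) :
    (if pvNorm (pvGetS fact "title") == "" || PySem.Str.strip (pvGetS fact "content") == "" then acc
     else
       existing_records.foldl (fun cs current =>
         if pvNorm (pvGetS fact "title") == pvNorm (pvGetS current "title") &&
            pvNorm (pvGetS fact "category") == pvNorm (pvGetS current "category") &&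
            PySem.Str.strip (pvGetS current "content") != "" &&
            PySem.Str.strip (pvGetS current "content") != PySem.Str.strip (pvGetS fact "content") then
           cs ++ [[("title", pvGetS fact "title"), ("category", pvGetS fact "category"),
                   ("old_content", PySem.Str.strip (pvGetS current "content")),
                   ("new_content", PySem.Str.strip (pvGetS fact "content"))]]
         else cs) acc)
      = (if pvNorm (pvGetS fact "title") == "" || PySem.Str.strip (pvGetS fact "content") == "" then acc
         else
           ((pvIndex existing_records).getD (pvNorm (pvGetS fact "title"), pvNorm (pvGetS fact "category")) []).foldl
             (fun cs old_content =>
               if old_content != PySem.Str.strip (pvGetS fact "content") then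
                 cs ++ [[("title", pvGetS fact "title"), ("category", pvGetS fact "category"),
                         ("old_content", old_content), ("new_content", PySem.Str.strip (pvGetS fact "content"))]]
               else cs) acc) := by
  by_cases hg : (pvNorm (pvGetS fact "title") == "" || PySem.Str.strip (pvGetS fact "content") == "") = true
  · rw [if_pos hg, if_pos hg]
  · rw [if_neg hg, if_neg hg]
    exact pv_gen_inner existing_records
      (fun current => pvNorm (pvGetS current "title"))
      (fun current => pvNorm (pvGetS current "category"))
      (fun current => PySem.Str.strip (pvGetS current "content"))
      (pvNorm (pvGetS fact "title")) (pvNorm (pvGetS fact "category"))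
      (PySem.Str.strip (pvGetS fact "content"))
      (fun old => [("title", pvGetS fact "title"), ("category", pvGetS fact "category"),
                   ("old_content", old), ("new_content", PySem.Str.strip (pvGetS fact "content"))]) acc

set_option maxHeartbeats 1000000 in
theorem pv_main (existing_records : List (List (String × String))) (new_facts : List (List (String × String)))
    (acc : List (List (String × String))) :
    new_facts.foldl (fun conflicts fact =>
        if pvNorm (pvGetS fact "title") == "" || PySem.Str.strip (pvGetS fact "content") == "" then conflicts
        else
          existing_records.foldl (fun cs current =>
            if pvNorm (pvGetS fact "title") == pvNorm (pvGetS current "title") &&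
               pvNorm (pvGetS fact "category") == pvNorm (pvGetS current "category") &&
               PySem.Str.strip (pvGetS current "content") != "" &&
               PySem.Str.strip (pvGetS current "content") != PySem.Str.strip (pvGetS fact "content") then
              cs ++ [[("title", pvGetS fact "title"), ("category", pvGetS fact "category"),
                      ("old_content", PySem.Str.strip (pvGetS current "content")),
                      ("new_content", PySem.Str.strip (pvGetS fact "content"))]]
            else cs) conflicts) acc
      = new_facts.foldl (fun conflicts fact =>
          if pvNorm (pvGetS fact "title") == "" || PySem.Str.strip (pvGetS fact "content") == "" then conflicts
          else
            ((pvIndex existing_records).getD (pvNorm (pvGetS fact "title"), pvNorm (pvGetS fact "category")) []).foldl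
              (fun cs old_content =>
                if old_content != PySem.Str.strip (pvGetS fact "content") then
                  cs ++ [[("title", pvGetS fact "title"), ("category", pvGetS fact "category"),
                          ("old_content", old_content), ("new_content", PySem.Str.strip (pvGetS fact "content"))]]
                else cs) conflicts) acc := by
  induction new_facts generalizing acc with
  | nil => simp only [List.foldl_nil]
  | cons fact rest ih =>
    simp only [List.foldl_cons]
    rw [pv_step existing_records fact acc]
    exact ih _

-- ===== VERDICT (by name: the statement is the Claim_ definition above) =====
theorem detect_fact_conflicts_spec : Claim_equal_detect_fact_conflicts := by
  intro existing_records new_facts _ _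
  unfold Spec_detect_fact_conflicts detect_fact_conflicts detect_fact_conflicts_alt
  exact pv_main existing_records new_facts []
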